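-- pv_equiv track=rewrite | github.com/OpenData-NC/data-dashboard | dashboard/search/search.py | make_query_params
-- ===== SOURCE A (Python) =====
-- def make_query_params(query):
--     query_params = query.replace('/search/','').split('|')
--     formatted_query_params = []
--     how_many = len(query_params)
--     for i in range(0, how_many):
--         formatted_param = query_params[i]
--         if i%2 == 0:
--             formatted_param = formatted_param.replace('_', ' ')
--             formatted_param = formatted_param.replace('-', ' ')
--             formatted_param = formatted_param.capitalize() + ' = '
--         else:
--             if i != how_many -1:
--                 formatted_param+= '; '
--
--         formatted_query_params.append(formatted_param)
--     return ''.join(formatted_query_params)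
-- ===== SOURCE B (Python) =====
-- def make_query_params(query):
--     pieces = []
--     pending = None
--     for part in query.replace('/search/', '').split('|'):
--         if pending is None:
--             pending = part.replace('_', ' ').replace('-', ' ').capitalize() + ' = '
--         else:
--             pieces.append(pending + part)
--             pending = None
--     if pending is not None:
--         pieces.append(pending)
--     return '; '.join(pieces)
-- ===== Notes on version B (the rewrite author's own statement) =====
-- stated objective: simpler
-- what changed: Replaces A's index loop with its parity branch and manual trailing-separator logic by a single pending-key pass that pairs each key with its value and joins the resulting pieces with the separator.
import Mathlib
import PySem

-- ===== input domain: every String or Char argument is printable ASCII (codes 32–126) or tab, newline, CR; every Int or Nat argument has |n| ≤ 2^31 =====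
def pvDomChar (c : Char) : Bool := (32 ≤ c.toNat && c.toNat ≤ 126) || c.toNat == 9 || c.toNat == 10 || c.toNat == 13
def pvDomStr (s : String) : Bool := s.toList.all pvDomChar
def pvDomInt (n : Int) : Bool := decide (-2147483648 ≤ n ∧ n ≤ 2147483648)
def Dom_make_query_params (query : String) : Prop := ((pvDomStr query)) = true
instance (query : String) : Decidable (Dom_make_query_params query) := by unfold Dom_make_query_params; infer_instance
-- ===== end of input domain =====

-- B replaces A's index loop with parity branches and manual '; ' separators by a single
-- pending-key pass that pairs each key with its value and joins the pieces with the separator (objective: simpler).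

-- Python str.capitalize(), exact on the ASCII domain: upper-case the first character, lower-case the rest
def pyCapitalize : List Char → List Char
  | [] => []
  | c :: rest => PySem.Chars.upperChar c :: PySem.Chars.lower rest

-- p.replace('_',' ').replace('-',' ').capitalize() + ' = '   (the key-formatting steps both Pythons perform)
def fmtKey (p : List Char) : List Char :=
  pyCapitalize (PySem.Chars.replace (PySem.Chars.replace p "_".toList " ".toList) "-".toList " ".toList)
    ++ " = ".toList

-- ===== PORT A =====
def make_query_params (query : String) : String :=
  let query_params := PySem.Chars.splitOn (PySem.Chars.replace query.toList "/search/".toList []) "|".toList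
  let how_many : Int := PySem.List.len query_params
  let formatted := (PySem.List.pyRange 0 how_many 1).foldl (fun acc i =>
    let fp := PySem.List.pyGetD query_params i []
    let fp := if PySem.Int.mod i 2 == 0 then fmtKey fp
              else if i ≠ how_many - 1 then fp ++ "; ".toList else fp
    acc ++ [fp]) []
  String.ofList (PySem.Chars.join [] formatted)

-- ===== PORT B =====
def make_query_params_alt (query : String) : String :=
  let parts := PySem.Chars.splitOn (PySem.Chars.replace query.toList "/search/".toList []) "|".toList
  let st := parts.foldl (fun (st : List (List Char) × Option (List Char)) part =>
      match st.2 with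
      | none => (st.1, some (fmtKey part))
      | some k => (st.1 ++ [k ++ part], none)) ([], none)
  let pieces := match st.2 with
    | none => st.1
    | some k => st.1 ++ [k]
  String.ofList (PySem.Chars.join "; ".toList pieces)

-- ===== PRECONDITION & SPEC =====
def Spec_make_query_params (query : String) (out : String) : Prop := out = make_query_params_alt query
instance (query : String) (out : String) : Decidable (Spec_make_query_params query out) := by unfold Spec_make_query_params; infer_instance

-- ===== CLAIM (what is proved, stated in full; the proofs are below) =====
def Claim_equal_make_query_params : Prop := ∀ (query : String), Dom_make_query_params query → Spec_make_query_params query (make_query_params query)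

-- ===== LEMMAS AND PROOFS =====

-- concatenation A builds: key, value, '; ' unless the value is last, lone trailing key
def aCat : List (List Char) → List Char
  | [] => []
  | [k] => fmtKey k
  | k :: v :: rest => fmtKey k ++ v ++ (if rest.isEmpty then [] else "; ".toList) ++ aCat rest

-- pieces B builds: one 'key = value' piece per pair, a lone formatted key at the end if odd
def gPieces : List (List Char) → List (List Char)
  | [] => []
  | [k] => [fmtKey k]
  | k :: v :: rest => (fmtKey k ++ v) :: gPieces rest

lemma join_nil_flatten (l : List (List Char)) : PySem.Chars.join [] l = l.flatten := by
  induction l with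
  | nil => simp [PySem.Chars.join_nil]
  | cons p rest ih =>
    cases rest with
    | nil => simp [PySem.Chars.join_singleton]
    | cons q rs => simp [PySem.Chars.join_cons_cons, ih]

lemma gPieces_ne_nil (r : List Char) (rs : List (List Char)) : gPieces (r :: rs) ≠ [] := by
  cases rs with
  | nil => simp [gPieces]
  | cons v rest => simp [gPieces]

lemma mod_even (s : Int) (h : s % 2 = 0) : (PySem.Int.mod s 2 == 0) = true := by
  simp [PySem.Int.mod, Int.fmod_eq_emod]; omega

lemma mod_odd (s : Int) (h : s % 2 = 0) : (PySem.Int.mod (s + 1) 2 == 0) = false := by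
  simp [PySem.Int.mod, Int.fmod_eq_emod]; omega

lemma flatMap_singleton_map (l : List Int) (f : Int → List Char) :
    l.flatMap (fun x => [f x]) = l.map f := by
  induction l with
  | nil => rfl
  | cons a t ih => simp [List.flatMap_cons, ih]

lemma A_core (qp : List (List Char)) : ∀ (s n : Int), s % 2 = 0 → n = s + qp.length →
    ((PySem.List.enumerate qp s).map (fun p : Int × List Char =>
        if PySem.Int.mod p.1 2 == 0 then fmtKey p.2
        else if p.1 ≠ n - 1 then p.2 ++ "; ".toList else p.2)).flatten = aCat qp := by
  induction qp using aCat.induct with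
  | case1 =>
    intro s n _ _
    simp [PySem.List.enumerate_nil, aCat]
  | case2 k =>
    intro s n hs _
    rw [PySem.List.enumerate_cons, PySem.List.enumerate_nil]
    simp only [List.map_cons, List.map_nil, List.flatten_cons, List.flatten_nil,
      mod_even s hs, if_true, aCat, List.append_nil]
  | case3 k v rest ih =>
    intro s n hs hn
    have hlen : (((k :: v :: rest : List (List Char))).length : Int) = 2 + rest.length := by
      simp; omega
    rw [hlen] at hn
    rw [PySem.List.enumerate_cons, PySem.List.enumerate_cons]
    simp only [List.map_cons, List.flatten_cons, mod_even s hs, mod_odd s hs, if_true, if_false,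
      Bool.false_eq_true]
    have h2 : s + 1 + 1 = s + 2 := by ring
    rw [h2, ih (s + 2) n (by omega) (by omega)]
    rcases rest with _ | ⟨r, rs⟩
    · have heq : s + 1 = n - 1 := by simp at hn; omega
      simp [aCat, heq]
    · have hne : s + 1 ≠ n - 1 := by simp at hn; omega
      simp [aCat, hne]

lemma B_fold (qp : List (List Char)) : ∀ (pieces : List (List Char)),
    (let st := qp.foldl (fun (st : List (List Char) × Option (List Char)) part =>
        match st.2 with
        | none => (st.1, some (fmtKey part))
        | some k => (st.1 ++ [k ++ part], none)) (pieces, none)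
     match st.2 with
     | none => st.1
     | some k => st.1 ++ [k]) = pieces ++ gPieces qp := by
  induction qp using gPieces.induct with
  | case1 => intro pieces; simp [gPieces]
  | case2 k => intro pieces; simp [gPieces]
  | case3 k v rest ih =>
    intro pieces
    simp only [List.foldl_cons]
    rw [ih (pieces ++ [fmtKey k ++ v])]
    simp [gPieces]

lemma join_gPieces (qp : List (List Char)) :
    PySem.Chars.join "; ".toList (gPieces qp) = aCat qp := by
  induction qp using aCat.induct with
  | case1 => simp [gPieces, aCat, PySem.Chars.join_nil]
  | case2 k => simp [gPieces, aCat, PySem.Chars.join_singleton]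
  | case3 k v rest ih =>
    cases rest with
    | nil => simp [gPieces, aCat, PySem.Chars.join_singleton]
    | cons r rs =>
      obtain ⟨h, t, hht⟩ := List.exists_cons_of_ne_nil (gPieces_ne_nil r rs)
      show PySem.Chars.join "; ".toList ((fmtKey k ++ v) :: gPieces (r :: rs)) = _
      rw [hht, PySem.Chars.join_cons_cons, ← hht, ih]
      simp [aCat]

-- ===== VERDICT (by name: the statement is the Claim_ definition above) =====
theorem make_query_params_spec : Claim_equal_make_query_params := by
  intro query _
  unfold Spec_make_query_params make_query_params make_query_params_alt
  simp only []
  generalize hqp : PySem.Chars.splitOn (PySem.Chars.replace query.toList "/search/".toList []) "|".toList = qp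
  congr 1
  rw [B_fold qp [], List.nil_append, join_gPieces]
  rw [PySem.List.foldl_append_eq_flatMap (fun i =>
      [if PySem.Int.mod i 2 == 0 then fmtKey (PySem.List.pyGetD qp i [])
       else if i ≠ PySem.List.len qp - 1 then PySem.List.pyGetD qp i [] ++ "; ".toList
       else PySem.List.pyGetD qp i []])]
  rw [List.nil_append, flatMap_singleton_map, join_nil_flatten]
  have : (PySem.List.pyRange 0 (PySem.List.len qp) 1).map (fun i =>
      if PySem.Int.mod i 2 == 0 then fmtKey (PySem.List.pyGetD qp i [])
      else if i ≠ PySem.List.len qp - 1 then PySem.List.pyGetD qp i [] ++ "; ".toList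
      else PySem.List.pyGetD qp i [])
    = (PySem.List.enumerate qp 0).map (fun p : Int × List Char =>
        if PySem.Int.mod p.1 2 == 0 then fmtKey p.2
        else if p.1 ≠ PySem.List.len qp - 1 then p.2 ++ "; ".toList else p.2) := by
    rw [PySem.List.enumerate_eq_map_pyRange qp ([] : List Char), List.map_map]
    rfl
  rw [this, A_core qp 0 (PySem.List.len qp) (by omega) (by simp [PySem.List.len])]
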